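-- pv_equiv track=rewrite | github.com/giuliana-marquesi/estudo-python | coursera/soma_hipotenusas.py | eh_hipotenusa
-- ===== SOURCE A (Python) =====
-- def eh_hipotenusa(n):
--     quadrado = n ** 2
--     cat_a = 3
--     while cat_a < n:
--         cat_b = 3
--         while cat_b < n:
--             if cat_a ** 2 + cat_b ** 2 == quadrado:
--                 return True
--             cat_b = cat_b + 1
--         cat_a = cat_a + 1
--     return False
-- ===== SOURCE B (Python) =====
-- def eh_hipotenusa(n):
--     # Two-pointer scan: one leg climbs from 3, the other descends from n-1.
--     alvo = n * n
--     lo = 3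
--     hi = n - 1
--     while lo <= hi:
--         s = lo * lo + hi * hi
--         if s == alvo:
--             return True
--         if s < alvo:
--             lo = lo + 1
--         else:
--             hi = hi - 1
--     return False
-- ===== Notes on version B (the rewrite author's own statement) =====
-- stated objective: faster
-- what changed: Replaced the nested brute-force scan over both legs by a single two-pointer sweep (one leg ascending, one descending) exploiting monotonicity of a^2+b^2.
import Mathlib
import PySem

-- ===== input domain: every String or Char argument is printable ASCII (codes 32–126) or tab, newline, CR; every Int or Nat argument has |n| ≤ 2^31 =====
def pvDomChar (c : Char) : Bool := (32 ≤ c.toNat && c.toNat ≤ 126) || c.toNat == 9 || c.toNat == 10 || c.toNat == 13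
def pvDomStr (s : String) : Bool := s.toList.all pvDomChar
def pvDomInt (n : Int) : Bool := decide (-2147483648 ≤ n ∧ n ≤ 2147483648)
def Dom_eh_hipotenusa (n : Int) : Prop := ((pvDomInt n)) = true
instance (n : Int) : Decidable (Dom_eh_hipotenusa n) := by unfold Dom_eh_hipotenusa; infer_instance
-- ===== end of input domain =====

-- B replaces A's nested scan over both legs by a single two-pointer sweep.
-- Loops are ported with an exact fuel counter ((n-3).toNat, the number of iterations) to make them total.

-- ===== PORT A =====
-- inner `while cat_b < n` loop of A (returns true on a hit, false when the loop ends)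
def ehInnerA (n quadrado cat_a : Int) : Nat → Int → Bool
  | 0, _ => false
  | fuel + 1, cat_b =>
      if cat_b < n then
        if cat_a ^ 2 + cat_b ^ 2 = quadrado then true
        else ehInnerA n quadrado cat_a fuel (cat_b + 1)
      else false

-- outer `while cat_a < n` loop of A
def ehOuterA (n quadrado : Int) : Nat → Int → Bool
  | 0, _ => false
  | fuel + 1, cat_a =>
      if cat_a < n then
        if ehInnerA n quadrado cat_a (n - 3).toNat 3 then true
        else ehOuterA n quadrado fuel (cat_a + 1)
      else false

def eh_hipotenusa (n : Int) : Bool :=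
  let quadrado := n ^ 2
  ehOuterA n quadrado (n - 3).toNat 3

-- ===== PORT B =====
-- the `while lo <= hi` two-pointer loop of B
def ehTp (alvo : Int) : Nat → Int → Int → Bool
  | 0, _, _ => false
  | fuel + 1, lo, hi =>
      if lo ≤ hi then
        if lo * lo + hi * hi = alvo then true
        else if lo * lo + hi * hi < alvo then ehTp alvo fuel (lo + 1) hi
        else ehTp alvo fuel lo (hi - 1)
      else false

def eh_hipotenusa_alt (n : Int) : Bool :=
  let alvo := n * n
  ehTp alvo (n - 3).toNat 3 (n - 1)

-- ===== PRECONDITION & SPEC =====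
def Spec_eh_hipotenusa (n : Int) (out : Bool) : Prop := out = eh_hipotenusa_alt n
instance (n : Int) (out : Bool) : Decidable (Spec_eh_hipotenusa n out) := by unfold Spec_eh_hipotenusa; infer_instance

-- ===== CLAIM (what is proved, stated in full; the proofs are below) =====
def Claim_equal_eh_hipotenusa : Prop := ∀ (n : Int), Dom_eh_hipotenusa n → Spec_eh_hipotenusa n (eh_hipotenusa n)

-- ===== LEMMAS AND PROOFS =====

theorem ehInnerA_iff (n quadrado cat_a : Int) (fuel : Nat) :
    ∀ cat_b : Int, n - cat_b ≤ (fuel : Int) →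
      (ehInnerA n quadrado cat_a fuel cat_b = true ↔
        ∃ b, cat_b ≤ b ∧ b < n ∧ cat_a ^ 2 + b ^ 2 = quadrado) := by
  induction fuel with
  | zero =>
      intro cat_b hf
      simp only [ehInnerA, Bool.false_eq_true, false_iff]
      rintro ⟨b, h1, h2, _⟩
      omega
  | succ fuel ih =>
      intro cat_b hf
      simp only [ehInnerA]
      by_cases hb : cat_b < n
      · simp only [hb, if_true]
        by_cases hhit : cat_a ^ 2 + cat_b ^ 2 = quadrado
        · simp only [hhit, if_true, true_iff]
          exact ⟨cat_b, le_refl _, hb, hhit⟩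
        · simp only [hhit, if_false]
          rw [ih (cat_b + 1) (by push_cast at hf ⊢; omega)]
          constructor
          · rintro ⟨b, h1, h2, h3⟩; exact ⟨b, by omega, h2, h3⟩
          · rintro ⟨b, h1, h2, h3⟩
            refine ⟨b, ?_, h2, h3⟩
            rcases lt_or_eq_of_le h1 with h | h
            · omega
            · exact absurd (h ▸ h3) hhit
      · simp only [hb, if_false, Bool.false_eq_true, false_iff]
        rintro ⟨b, h1, h2, _⟩
        omega

theorem ehOuterA_iff (n quadrado : Int) (fuel : Nat) :
    ∀ cat_a : Int, n - cat_a ≤ (fuel : Int) →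
      (ehOuterA n quadrado fuel cat_a = true ↔
        ∃ a b, cat_a ≤ a ∧ a < n ∧ 3 ≤ b ∧ b < n ∧ a ^ 2 + b ^ 2 = quadrado) := by
  induction fuel with
  | zero =>
      intro cat_a hf
      simp only [ehOuterA, Bool.false_eq_true, false_iff]
      rintro ⟨a, b, h1, h2, _⟩
      omega
  | succ fuel ih =>
      intro cat_a hf
      simp only [ehOuterA]
      by_cases ha : cat_a < n
      · simp only [ha, if_true]
        have hinner := ehInnerA_iff n quadrado cat_a (n - 3).toNat 3 (by omega)
        by_cases hhit : ehInnerA n quadrado cat_a (n - 3).toNat 3 = true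
        · simp only [hhit, if_true, true_iff]
          rcases hinner.mp hhit with ⟨b, h1, h2, h3⟩
          exact ⟨cat_a, b, le_refl _, ha, h1, h2, h3⟩
        · simp only [hhit, Bool.false_eq_true, if_false]
          rw [ih (cat_a + 1) (by push_cast at hf ⊢; omega)]
          constructor
          · rintro ⟨a, b, h1, h2, h3, h4, h5⟩; exact ⟨a, b, by omega, h2, h3, h4, h5⟩
          · rintro ⟨a, b, h1, h2, h3, h4, h5⟩
            refine ⟨a, b, ?_, h2, h3, h4, h5⟩
            rcases lt_or_eq_of_le h1 with h | h
            · omega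
            · exact absurd (hinner.mpr ⟨b, h3, h4, by rw [h]; exact h5⟩) hhit
      · simp only [ha, if_false, Bool.false_eq_true, false_iff]
        rintro ⟨a, b, h1, h2, _⟩
        omega

theorem ehTp_iff (alvo : Int) (fuel : Nat) :
    ∀ lo hi : Int, 0 ≤ lo → hi - lo + 1 ≤ (fuel : Int) →
      (ehTp alvo fuel lo hi = true ↔
        ∃ a b, lo ≤ a ∧ a ≤ b ∧ b ≤ hi ∧ a * a + b * b = alvo) := by
  induction fuel with
  | zero =>
      intro lo hi hlo hf
      simp only [ehTp, Bool.false_eq_true, false_iff]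
      rintro ⟨a, b, h1, h2, h3, _⟩
      omega
  | succ fuel ih =>
      intro lo hi hlo hf
      simp only [ehTp]
      by_cases hle : lo ≤ hi
      · simp only [hle, if_true]
        by_cases hhit : lo * lo + hi * hi = alvo
        · simp only [hhit, if_true, true_iff]
          exact ⟨lo, hi, le_refl _, hle, le_refl _, hhit⟩
        · simp only [hhit, if_false]
          by_cases hlt : lo * lo + hi * hi < alvo
          · simp only [hlt, if_true]
            rw [ih (lo + 1) hi (by omega) (by push_cast at hf ⊢; omega)]
            constructor
            · rintro ⟨a, b, h1, h2, h3, h4⟩; exact ⟨a, b, by omega, h2, h3, h4⟩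
            · rintro ⟨a, b, h1, h2, h3, h4⟩
              refine ⟨a, b, ?_, h2, h3, h4⟩
              rcases lt_or_eq_of_le h1 with h | h
              · omega
              · -- a = lo: then a*a + b*b ≤ lo*lo + hi*hi < alvo, contradicting h4
                exfalso
                subst h
                have hb0 : 0 ≤ b := le_trans hlo h2
                have hsq : b * b ≤ hi * hi := mul_self_le_mul_self hb0 h3
                linarith
          · simp only [hlt, if_false]
            rw [ih lo (hi - 1) hlo (by push_cast at hf ⊢; omega)]
            constructor
            · rintro ⟨a, b, h1, h2, h3, h4⟩; exact ⟨a, b, h1, h2, by omega, h4⟩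
            · rintro ⟨a, b, h1, h2, h3, h4⟩
              refine ⟨a, b, h1, h2, ?_, h4⟩
              rcases lt_or_eq_of_le h3 with h | h
              · omega
              · -- b = hi: then a*a + b*b ≥ lo*lo + hi*hi > alvo, contradicting h4
                exfalso
                subst h
                have hsq : lo * lo ≤ a * a := mul_self_le_mul_self hlo h1
                have hgt : alvo < lo * lo + b * b :=
                  lt_of_le_of_ne (not_lt.mp hlt) (fun he => hhit he.symm)
                linarith
      · simp only [hle, if_false, Bool.false_eq_true, false_iff]
        rintro ⟨a, b, h1, h2, h3, _⟩
        omega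

-- ===== VERDICT (by name: the statement is the Claim_ definition above) =====
theorem eh_hipotenusa_spec : Claim_equal_eh_hipotenusa := by
  intro n _
  unfold Spec_eh_hipotenusa eh_hipotenusa eh_hipotenusa_alt
  rw [Bool.eq_iff_iff,
    ehOuterA_iff n (n ^ 2) (n - 3).toNat 3 (by omega),
    ehTp_iff (n * n) (n - 3).toNat 3 (n - 1) (by norm_num) (by omega)]
  constructor
  · rintro ⟨a, b, h1, h2, h3, h4, h5⟩
    rcases le_total a b with h | h
    · exact ⟨a, b, h1, h, by omega, by ring_nf; ring_nf at h5; linarith⟩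
    · exact ⟨b, a, h3, h, by omega, by ring_nf; ring_nf at h5; linarith⟩
  · rintro ⟨a, b, h1, h2, h3, h4⟩
    exact ⟨a, b, h1, by omega, by omega, by omega, by ring_nf; ring_nf at h4; linarith⟩
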